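-- pv_equiv track=rewrite | github.com/Kommora/nQueens | N-Rainhas/backtrack/n-rainhasV1.py | atk
-- ===== SOURCE A (Python) =====
-- def atk(tab,i):
--     tab[i]=tab[i]+1
--     if tab[i]>len(tab):
--         tab[i]=0
--         return 1
--     x=0
--     while x<i:
--         if x!=i and tab[x]!=0 and (tab[x]==tab[i] or (((x-i)**2)-((tab[x]-tab[i])**2)==0)):
--             tab[i]=tab[i]+1
--             if tab[i]>len(tab):
--                 tab[i]=0
--                 return 1
--             else:
--                 x=0
--         else:
--             x=x+1
--     return 0
-- ===== SOURCE B (Python) =====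
-- def atk(tab, i):
--     # Precompute the forbidden values (row + both diagonals) from earlier columns
--     # once, then pick the first candidate above tab[i] that is not forbidden.
--     # Same in-place mutation of tab[i] and same return value as the original.
--     n = len(tab)
--     forbidden = set()
--     for x in range(i):
--         q = tab[x]
--         if q != 0:
--             forbidden.update((q, q + (i - x), q - (i - x)))
--     for v in range(tab[i] + 1, n + 1):
--         if v not in forbidden:
--             tab[i] = v
--             return 0
--     tab[i] = 0
--     return 1
-- ===== Notes on version B (the rewrite author's own statement) =====
-- stated objective: alternative
-- what changed: Instead of A's restart-scan (rescanning all earlier columns from x=0 after every increment), B precomputes once the set of forbidden values (each earlier nonzero column's row value and its two diagonal values) and then takes the first candidate above tab[i] not in that set, so the search has no inner column scan at all.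
import Mathlib
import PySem

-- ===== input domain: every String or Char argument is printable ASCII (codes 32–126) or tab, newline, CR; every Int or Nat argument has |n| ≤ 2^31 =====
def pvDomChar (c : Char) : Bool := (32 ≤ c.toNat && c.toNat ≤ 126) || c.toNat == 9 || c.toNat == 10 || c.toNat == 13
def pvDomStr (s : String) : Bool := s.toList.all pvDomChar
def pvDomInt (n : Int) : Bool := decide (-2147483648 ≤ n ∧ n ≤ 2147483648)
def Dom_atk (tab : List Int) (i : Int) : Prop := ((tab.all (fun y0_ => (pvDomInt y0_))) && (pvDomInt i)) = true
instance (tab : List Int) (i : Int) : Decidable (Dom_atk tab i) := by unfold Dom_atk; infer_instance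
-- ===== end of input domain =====

-- B replaces A's restart-scan search by precomputing the set of forbidden values from the earlier
-- columns once and then picking the first non-forbidden candidate (alternative algorithm).
-- Both Pythons mutate tab[i] in place identically; the equivalence proved is about the RETURN value.

-- ===== PORT A =====
-- A's while loop over x with the manual x=0 restart; tab[i]'s current (mutated) value is v.
-- tab[x] inside Pre_ is always in range; '(pyGet? …).getD 0' is exact there (none never occurs).
def atkLoopA (tab : List Int) (i n : Int) (v x : Int) : Int :=
  if _hx : x < i then
    if x ≠ i ∧ (PySem.List.pyGet? tab x).getD 0 ≠ 0 ∧
        ((PySem.List.pyGet? tab x).getD 0 = v ∨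
         (x - i) ^ 2 - ((PySem.List.pyGet? tab x).getD 0 - v) ^ 2 = 0) then
      if _hv : v + 1 > n then 1 else atkLoopA tab i n (v + 1) 0
    else atkLoopA tab i n v (x + 1)
  else 0
termination_by ((n + 1 - v).toNat, (i - x).toNat)
decreasing_by
  · exact Prod.Lex.left _ _ (by omega)
  · exact Prod.Lex.right _ (by omega)

def atk (tab : List Int) (i : Int) : Int :=
  let n : Int := tab.length
  let v : Int := (PySem.List.pyGet? tab i).getD 0 + 1
  if v > n then 1 else atkLoopA tab i n v 0

-- ===== PORT B =====
-- the first pass of Source B: forbidden = set(); for x in range(i): … forbidden.update((q, q+(i-x), q-(i-x)))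
def atkForb (tab : List Int) (i : Int) : PySem.Set Int :=
  (PySem.List.pyRange 0 i 1).foldl (fun s x =>
    let q := (PySem.List.pyGet? tab x).getD 0
    if q ≠ 0 then PySem.Set.update s [q, q + (i - x), q - (i - x)] else s) PySem.Set.empty

-- the second pass of Source B: 'for v in range(t+1, n+1): if v not in forbidden: return 0' / fall through
-- to 'return 1'; Python's range is lazy, so the for loop is ported as this structural recursion.
def atkFind (forb : PySem.Set Int) (v stop : Int) : Int :=
  if _h : v < stop then
    (if forb.contains v = false then 0 else atkFind forb (v + 1) stop)
  else 1
termination_by (stop - v).toNat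
decreasing_by omega

def atk_alt (tab : List Int) (i : Int) : Int :=
  atkFind (atkForb tab i) ((PySem.List.pyGet? tab i).getD 0 + 1) ((tab.length : Int) + 1)

-- ===== PRECONDITION & SPEC =====
-- Pre_ excludes exactly the inputs where Python A raises IndexError: i not a valid (possibly
-- negative) index into tab.
def Pre_atk (tab : List Int) (i : Int) : Prop := -(tab.length : Int) ≤ i ∧ i < tab.length
instance (tab : List Int) (i : Int) : Decidable (Pre_atk tab i) := by unfold Pre_atk; infer_instance

def pvWitness_atk : List Int × Int := ([0, 0, 0, 0], 1)

def Spec_atk (tab : List Int) (i : Int) (out : Int) : Prop := out = atk_alt tab i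
instance (tab : List Int) (i : Int) (out : Int) : Decidable (Spec_atk tab i out) := by unfold Spec_atk; infer_instance

-- ===== CLAIM (what is proved, stated in full; the proofs are below) =====
def Claim_equal_atk : Prop := ∀ (tab : List Int) (i : Int), Dom_atk tab i → Pre_atk tab i → Spec_atk tab i (atk tab i)

-- ===== LEMMAS AND PROOFS =====

-- A's conflict condition at column x against candidate value v (abbreviation for the proofs)
def ConfA (tab : List Int) (i x v : Int) : Prop :=
  x ≠ i ∧ (PySem.List.pyGet? tab x).getD 0 ≠ 0 ∧
    ((PySem.List.pyGet? tab x).getD 0 = v ∨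
     (x - i) ^ 2 - ((PySem.List.pyGet? tab x).getD 0 - v) ^ 2 = 0)

-- v is a safe value for column i
def SafeV (tab : List Int) (i v : Int) : Prop := ∀ x, 0 ≤ x → x < i → ¬ ConfA tab i x v

-- membership in the folded forbidden set
theorem mem_forbFold (tab : List Int) (i : Int) (l : List Int) (s : PySem.Set Int) (v : Int) :
    v ∈ l.foldl (fun s x =>
        let q := (PySem.List.pyGet? tab x).getD 0
        if q ≠ 0 then PySem.Set.update s [q, q + (i - x), q - (i - x)] else s) s ↔
      v ∈ s ∨ ∃ x ∈ l, (PySem.List.pyGet? tab x).getD 0 ≠ 0 ∧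
        (v = (PySem.List.pyGet? tab x).getD 0 ∨
         v = (PySem.List.pyGet? tab x).getD 0 + (i - x) ∨
         v = (PySem.List.pyGet? tab x).getD 0 - (i - x)) := by
  induction l generalizing s with
  | nil => simp
  | cons a l ih =>
    simp only [List.foldl_cons, ih]
    by_cases hq : (PySem.List.pyGet? tab a).getD 0 ≠ 0
    · simp only [if_pos hq, PySem.Set.update, List.foldl, PySem.Set.mem_add, List.mem_cons]
      constructor
      · rintro (((( h | h ) | h) | h) | ⟨x, hx, hx2⟩)
        · exact Or.inl h
        · exact Or.inr ⟨a, Or.inl rfl, hq, Or.inl h⟩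
        · exact Or.inr ⟨a, Or.inl rfl, hq, Or.inr (Or.inl h)⟩
        · exact Or.inr ⟨a, Or.inl rfl, hq, Or.inr (Or.inr h)⟩
        · exact Or.inr ⟨x, Or.inr hx, hx2⟩
      · rintro (h | ⟨x, (rfl | hx), h2, (h3 | h3 | h3)⟩)
        · exact Or.inl (Or.inl (Or.inl (Or.inl h)))
        · exact Or.inl (Or.inl (Or.inl (Or.inr h3)))
        · exact Or.inl (Or.inl (Or.inr h3))
        · exact Or.inl (Or.inr h3)
        all_goals exact Or.inr ⟨x, hx, h2, by tauto⟩
    · simp only [if_neg hq, List.mem_cons]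
      push Not at hq
      constructor
      · rintro (h | ⟨x, hx, hx2⟩)
        · exact Or.inl h
        · exact Or.inr ⟨x, Or.inr hx, hx2⟩
      · rintro (h | ⟨x, (rfl | hx), h2, h3⟩)
        · exact Or.inl h
        · exact absurd hq h2
        · exact Or.inr ⟨x, hx, h2, h3⟩

-- the difference-of-squares diagonal test names exactly the two diagonal values
theorem sq_diag_iff (x i q v : Int) :
    (x - i) ^ 2 - (q - v) ^ 2 = 0 ↔ v = q + (i - x) ∨ v = q - (i - x) := by
  constructor
  · intro h
    have h2 : ((x - i) - (q - v)) * ((x - i) + (q - v)) = 0 := by linear_combination h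
    rcases mul_eq_zero.mp h2 with h3 | h3 <;> omega
  · rintro (rfl | rfl) <;> ring

-- the forbidden set contains v iff some earlier column conflicts with v
theorem contains_forb_iff (tab : List Int) (i v : Int) :
    (atkForb tab i).contains v = true ↔ ∃ x, 0 ≤ x ∧ x < i ∧ ConfA tab i x v := by
  rw [PySem.Set.contains_iff]
  unfold atkForb ConfA
  rw [mem_forbFold]
  simp only [PySem.Set.empty, List.not_mem_nil, false_or]
  constructor
  · rintro ⟨x, hx, h2, h3⟩
    rw [PySem.List.mem_pyRange_one] at hx
    refine ⟨x, hx.1, hx.2, by omega, h2, ?_⟩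
    rcases h3 with h | h | h
    · exact Or.inl h.symm
    · exact Or.inr ((sq_diag_iff x i _ v).mpr (Or.inl h))
    · exact Or.inr ((sq_diag_iff x i _ v).mpr (Or.inr h))
  · rintro ⟨x, hx0, hxi, -, h2, h3⟩
    refine ⟨x, PySem.List.mem_pyRange_one.mpr ⟨hx0, hxi⟩, h2, ?_⟩
    rcases h3 with h | h
    · exact Or.inl h.symm
    · rcases (sq_diag_iff x i _ v).mp h with h | h
      · exact Or.inr (Or.inl h)
      · exact Or.inr (Or.inr h)

theorem contains_forb_false_iff (tab : List Int) (i v : Int) :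
    (atkForb tab i).contains v = false ↔ SafeV tab i v := by
  rw [← Bool.not_eq_true, contains_forb_iff]
  unfold SafeV
  constructor
  · intro h x hx0 hxi hc; exact h ⟨x, hx0, hxi, hc⟩
  · rintro h ⟨x, hx0, hxi, hc⟩; exact h x hx0 hxi hc

-- clear value: A's scan reaches the end and returns 0
theorem atkLoopA_clear (tab : List Int) (i n v : Int) (hclear : SafeV tab i v) :
    ∀ x, 0 ≤ x → atkLoopA tab i n v x = 0 := by
  intro x hx0
  generalize hk : (i - x).toNat = k
  induction k generalizing x with
  | zero =>
    have hxi : ¬ x < i := by omega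
    rw [atkLoopA, dif_neg hxi]
  | succ k ih =>
    have hxi : x < i := by omega
    rw [atkLoopA]
    have hc := hclear x hx0 hxi
    unfold ConfA at hc
    rw [dif_pos hxi, if_neg hc]
    exact ih (x + 1) (by omega) (by omega)

-- dirty value: some column ≥ x conflicts, so A's scan increments and restarts
theorem atkLoopA_dirty (tab : List Int) (i n v : Int) :
    ∀ x, (∃ y, x ≤ y ∧ y < i ∧ ConfA tab i y v) →
      atkLoopA tab i n v x = (if v + 1 > n then 1 else atkLoopA tab i n (v + 1) 0) := by
  intro x hy
  obtain ⟨y, hxy, hyi, hC⟩ := hy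
  generalize hk : (i - x).toNat = k
  induction k generalizing x with
  | zero => omega
  | succ k ih =>
    have hxi : x < i := by omega
    rw [atkLoopA, dif_pos hxi]
    by_cases hCx : ConfA tab i x v
    · unfold ConfA at hCx
      rw [if_pos hCx]; split_ifs with h <;> simp
    · have hCx' := hCx
      unfold ConfA at hCx'
      rw [if_neg hCx']
      have hxy' : x + 1 ≤ y := by
        rcases eq_or_lt_of_le hxy with h | h
        · exact absurd (h ▸ hC) hCx
        · omega
      exact ih (x + 1) hxy' (by omega)

-- A's search starting at candidate v: 0 iff some safe value in [v, n] exists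
theorem auxA_char (tab : List Int) (i n : Int) : ∀ v,
    ((∃ w, v ≤ w ∧ w ≤ n ∧ SafeV tab i w) →
        (if v > n then (1 : Int) else atkLoopA tab i n v 0) = 0) ∧
    ((∀ w, v ≤ w → w ≤ n → ¬ SafeV tab i w) →
        (if v > n then (1 : Int) else atkLoopA tab i n v 0) = 1) := by
  intro v
  generalize hk : (n + 1 - v).toNat = k
  induction k generalizing v with
  | zero =>
    have hv : v > n := by omega
    refine ⟨fun ⟨w, h1, h2, _⟩ => by omega, fun _ => by rw [if_pos hv]⟩
  | succ k ih =>
    have hv : ¬ v > n := by omega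
    rw [if_neg hv]
    by_cases hs : SafeV tab i v
    · refine ⟨fun _ => atkLoopA_clear tab i n v hs 0 le_rfl,
        fun h => absurd hs (h v le_rfl (by omega))⟩
    · have hd : ∃ y, (0:Int) ≤ y ∧ y < i ∧ ConfA tab i y v := by
        unfold SafeV at hs; push Not at hs
        obtain ⟨x, hx0, hxi, hc⟩ := hs; exact ⟨x, hx0, hxi, hc⟩
      rw [atkLoopA_dirty tab i n v 0 hd]
      obtain ⟨ih1, ih2⟩ := ih (v + 1) (by omega)
      constructor
      · rintro ⟨w, h1, h2, h3⟩
        have hw : v + 1 ≤ w := by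
          rcases eq_or_lt_of_le h1 with h | h
          · exact absurd (h ▸ h3) hs
          · omega
        exact ih1 ⟨w, hw, h2, h3⟩
      · intro h
        exact ih2 (fun w hw1 hw2 => h w (by omega) hw2)

-- B's search over [v, stop): 0 iff some non-forbidden value exists there
theorem atkFind_char (forb : PySem.Set Int) (stop : Int) : ∀ v,
    ((∃ w, v ≤ w ∧ w < stop ∧ forb.contains w = false) → atkFind forb v stop = 0) ∧
    ((∀ w, v ≤ w → w < stop → forb.contains w = true) → atkFind forb v stop = 1) := by
  intro v
  generalize hk : (stop - v).toNat = k
  induction k generalizing v with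
  | zero =>
    have hv : ¬ v < stop := by omega
    rw [atkFind, dif_neg hv]
    exact ⟨fun ⟨w, h1, h2, _⟩ => by omega, fun _ => rfl⟩
  | succ k ih =>
    have hv : v < stop := by omega
    rw [atkFind, dif_pos hv]
    obtain ⟨ih1, ih2⟩ := ih (v + 1) (by omega)
    by_cases hc : forb.contains v = false
    · rw [if_pos hc]
      exact ⟨fun _ => rfl, fun h => by rw [h v le_rfl hv] at hc; exact absurd hc (by simp)⟩
    · rw [if_neg hc]
      constructor
      · rintro ⟨w, h1, h2, h3⟩
        have hw : v + 1 ≤ w := by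
          rcases eq_or_lt_of_le h1 with h | h
          · rw [← h] at h3; exact absurd h3 hc
          · omega
        exact ih1 ⟨w, hw, h2, h3⟩
      · intro h
        exact ih2 (fun w hw1 hw2 => h w (by omega) hw2)

-- ===== VERDICT (by name: the statement is the Claim_ definition above) =====
theorem atk_spec : Claim_equal_atk := by
  intro tab i _ _
  unfold Spec_atk atk atk_alt
  set n : Int := (tab.length : Int) with hn
  set t : Int := (PySem.List.pyGet? tab i).getD 0 with ht
  by_cases hex : ∃ w, t + 1 ≤ w ∧ w ≤ n ∧ SafeV tab i w
  · rw [(auxA_char tab i n (t + 1)).1 hex,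
      (atkFind_char (atkForb tab i) (n + 1) (t + 1)).1 ?_]
    obtain ⟨w, h1, h2, h3⟩ := hex
    exact ⟨w, h1, by omega, (contains_forb_false_iff tab i w).mpr h3⟩
  · push Not at hex
    rw [(auxA_char tab i n (t + 1)).2 (fun w h1 h2 hs => hex w h1 h2 hs),
      (atkFind_char (atkForb tab i) (n + 1) (t + 1)).2 ?_]
    intro w hw1 hw2
    rw [← Bool.not_eq_false, contains_forb_false_iff]
    exact hex w hw1 (by omega)
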